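-- pv_equiv track=rewrite | github.com/lyclyq/MOE-temp | src/moe_gc/trainer.py | _safe_metric_key
-- ===== SOURCE A (Python) =====
-- from typing import Any, Dict, Iterable, List, Tuple
--
-- def _safe_metric_key(name: str) -> str:
--     out: List[str] = []
--     prev_us = False
--     for ch in str(name).strip().lower():
--         keep = ch.isalnum()
--         if keep:
--             out.append(ch)
--             prev_us = False
--             continue
--         if not prev_us:
--             out.append("_")
--             prev_us = True
--     text = "".join(out).strip("_")
--     return text or "task"
-- ===== SOURCE B (Python) =====
-- def _safe_metric_key(name: str) -> str:
--     # Run-based segmentation: split the normalized string into maximal runs of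
--     # equal isalnum-ness, keep the alphanumeric runs, join them with '_'.
--     s = str(name).strip().lower()
--     runs = []
--     i, n = 0, len(s)
--     while i < n:
--         j = i
--         while j < n and s[j].isalnum() == s[i].isalnum():
--             j += 1
--         if s[i].isalnum():
--             runs.append(s[i:j])
--         i = j
--     return "_".join(runs) or "task"
-- ===== Notes on version B (the rewrite author's own statement) =====
-- stated objective: idiomatic
-- what changed: Replaces A's per-character accumulator with a prev_us flag plus a final strip of underscores by run-based segmentation: split the normalized string into maximal runs of equal isalnum-ness with a two-pointer scan, keep the alphanumeric runs and join them with underscores.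
import Mathlib
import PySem

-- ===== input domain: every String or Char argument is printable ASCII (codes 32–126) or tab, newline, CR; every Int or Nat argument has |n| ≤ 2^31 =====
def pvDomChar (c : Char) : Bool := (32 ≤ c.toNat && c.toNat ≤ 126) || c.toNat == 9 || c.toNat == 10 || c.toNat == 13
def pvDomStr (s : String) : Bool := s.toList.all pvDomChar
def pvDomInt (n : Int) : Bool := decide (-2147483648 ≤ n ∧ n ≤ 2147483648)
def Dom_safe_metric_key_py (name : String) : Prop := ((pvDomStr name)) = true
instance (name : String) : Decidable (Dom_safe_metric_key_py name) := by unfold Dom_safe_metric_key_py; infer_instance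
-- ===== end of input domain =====

-- B replaces A's per-character accumulator with prev_us flag by run-based
-- segmentation (maximal isalnum runs joined by underscores); objective: idiomatic.

-- ===== PORT A =====
-- per-character loop: state (out, prev_us)
def safe_metric_key_py (name : String) : String :=
  let cs := PySem.Chars.lower (PySem.Chars.strip name.toList)
  let st := cs.foldl (fun (s : List Char × Bool) ch =>
      if PySem.Chars.isalnum ch then (s.1 ++ [ch], false)
      else if !s.2 then (s.1 ++ ['_'], true) else s) ([], false)
  let text := PySem.Chars.stripChars st.1 ['_']
  if text = [] then "task" else String.mk text

-- ===== PORT B =====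
-- the inner while loop of Source B: maximal run of chars with the same isalnum key,
-- alphanumeric runs are kept, the rest dropped
def pvRuns : List Char → List (List Char)
  | [] => []
  | c :: rest =>
    let k := PySem.Chars.isalnum c
    let run := c :: rest.takeWhile (fun d => PySem.Chars.isalnum d == k)
    let rest' := rest.dropWhile (fun d => PySem.Chars.isalnum d == k)
    if k then run :: pvRuns rest' else pvRuns rest'
  termination_by cs => cs.length
  decreasing_by
    all_goals
      simp only [List.length_cons]
      exact Nat.lt_succ_of_le (List.length_dropWhile_le _ _)

def safe_metric_key_py_alt (name : String) : String :=
  let s := PySem.Chars.lower (PySem.Chars.strip name.toList)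
  let text := PySem.Chars.join ['_'] (pvRuns s)
  if text = [] then "task" else String.mk text

-- ===== PRECONDITION & SPEC =====
def Spec_safe_metric_key_py (name : String) (out : String) : Prop := out = safe_metric_key_py_alt name
instance (name : String) (out : String) : Decidable (Spec_safe_metric_key_py name out) := by unfold Spec_safe_metric_key_py; infer_instance

-- ===== CLAIM (what is proved, stated in full; the proofs are below) =====
def Claim_equal_safe_metric_key_py : Prop := ∀ (name : String), Dom_safe_metric_key_py name → Spec_safe_metric_key_py name (safe_metric_key_py name)

-- ===== LEMMAS AND PROOFS =====

-- the string A's loop has built after consuming cs in state prev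
def pvRender : List Char → Bool → List Char
  | [], _ => []
  | c :: cs, prev =>
    if PySem.Chars.isalnum c then c :: pvRender cs false
    else if prev then pvRender cs prev else '_' :: pvRender cs true

theorem pvFold_eq (cs : List Char) : ∀ (out : List Char) (prev : Bool),
    (cs.foldl (fun (s : List Char × Bool) ch =>
      if PySem.Chars.isalnum ch then (s.1 ++ [ch], false)
      else if !s.2 then (s.1 ++ ['_'], true) else s) (out, prev)).1
      = out ++ pvRender cs prev := by
  induction cs with
  | nil => intro out prev; simp [pvRender]
  | cons c cs ih =>
    intro out prev
    rw [List.foldl_cons]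
    by_cases h : PySem.Chars.isalnum c = true
    · rw [if_pos h, ih]
      simp [pvRender, h]
    · rw [if_neg h]
      cases prev
      · rw [if_pos (show (!((out, false).2)) = true from rfl), ih]
        simp [pvRender, h]
      · rw [if_neg (show ¬ (!((out, true).2)) = true by simp), ih]
        simp [pvRender, h]

theorem pvRender_true (cs : List Char) :
    pvRender cs true = pvRender (cs.dropWhile (fun d => !PySem.Chars.isalnum d)) false := by
  induction cs with
  | nil => rfl
  | cons c cs ih =>
    by_cases h : PySem.Chars.isalnum c = true
    · simp [h, pvRender]
    · simp only [Bool.not_eq_true] at h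
      simp [h, pvRender, ih]

theorem pvRender_take (cs : List Char) :
    pvRender cs false
      = cs.takeWhile PySem.Chars.isalnum
        ++ pvRender (cs.dropWhile PySem.Chars.isalnum) false := by
  induction cs with
  | nil => rfl
  | cons c cs ih =>
    by_cases h : PySem.Chars.isalnum c = true
    · simp [h, pvRender, ih]
    · simp [h]

-- '_' is not alphanumeric
set_option maxRecDepth 4096 in
theorem pvUs_not_alnum : PySem.Chars.isalnum '_' = false := by decide

-- the strip predicate of .strip('_')
def pvP (c : Char) : Bool := (['_'] : List Char).contains c

theorem pvStrip_eq (xs : List Char) :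
    PySem.Chars.stripChars xs ['_']
      = (List.dropWhile pvP (List.dropWhile pvP xs).reverse).reverse := rfl

theorem pvP_us : pvP '_' = true := rfl

theorem pvP_alnum {x : Char} (h : PySem.Chars.isalnum x = true) : pvP x = false := by
  have hne : x ≠ '_' := by
    intro e
    rw [e, pvUs_not_alnum] at h
    exact Bool.false_ne_true h
  simp [pvP, hne]

theorem pvDrop_no {xs : List Char} (h : ∀ x ∈ xs, pvP x = false) :
    List.dropWhile pvP xs = xs :=
  List.dropWhile_eq_self_iff.mpr (fun hl => by simp [h _ (List.getElem_mem hl)])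

theorem pvHead_dropWhile {p : Char → Bool} {l : List Char} {d : Char} {r2 : List Char}
    (h : l.dropWhile p = d :: r2) : p d = false := by
  have := List.head_dropWhile_not p (l := l) (by simp [h])
  simpa [h] using this

-- stripping underscores: the three shapes the main induction meets
theorem pvStrip_cons (xs : List Char) :
    PySem.Chars.stripChars ('_' :: xs) ['_'] = PySem.Chars.stripChars xs ['_'] := by
  rw [pvStrip_eq, pvStrip_eq, List.dropWhile_cons_of_pos pvP_us]

theorem pvStrip_append_us (xs : List Char) :
    PySem.Chars.stripChars (xs ++ ['_']) ['_'] = PySem.Chars.stripChars xs ['_'] := by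
  rw [pvStrip_eq, pvStrip_eq, List.dropWhile_append]
  by_cases h : (List.dropWhile pvP xs).isEmpty = true
  · rw [if_pos h]
    rw [List.isEmpty_iff] at h
    rw [h]
    rfl
  · rw [if_neg h, List.reverse_append, show (['_'] : List Char).reverse = ['_'] from rfl,
      List.singleton_append, List.dropWhile_cons_of_pos pvP_us]

theorem pvStrip_no_us {xs : List Char} (h : ∀ x ∈ xs, pvP x = false) :
    PySem.Chars.stripChars xs ['_'] = xs := by
  rw [pvStrip_eq, pvDrop_no h,
    pvDrop_no (fun x hx => h x (List.mem_reverse.mp hx)), List.reverse_reverse]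

-- stripChars leaves a block that starts and ends next to a non-underscore alone
theorem pvStrip_mid (run Z : List Char)
    (hrun : ∀ x ∈ run, pvP x = false) (hrunne : run ≠ [])
    (hZ : ∃ z zs, Z = z :: zs ∧ pvP z = false) :
    PySem.Chars.stripChars (run ++ '_' :: Z) ['_']
      = run ++ '_' :: PySem.Chars.stripChars Z ['_'] := by
  obtain ⟨z, zs, rfl, hz⟩ := hZ
  obtain ⟨c, run', rfl⟩ := List.exists_cons_of_ne_nil hrunne
  have hc : ¬ pvP c = true := by simp [hrun c (by simp)]
  rw [pvStrip_eq, pvStrip_eq, List.cons_append, List.dropWhile_cons_of_neg hc,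
    List.dropWhile_cons_of_neg (by simp [hz])]
  have hrev : (c :: (run' ++ '_' :: z :: zs)).reverse
      = (z :: zs).reverse ++ '_' :: (c :: run').reverse := by
    simp
  rw [hrev, List.dropWhile_append]
  have hne : ¬ (List.dropWhile pvP (z :: zs).reverse).isEmpty = true := by
    rw [List.isEmpty_iff, List.dropWhile_eq_nil_iff]
    intro hall
    have := hall z (by simp)
    rw [hz] at this
    exact Bool.false_ne_true this
  rw [if_neg hne, List.reverse_append]
  simp

theorem pvRuns_nil : pvRuns [] = [] := by simp [pvRuns]

theorem pvBeq_true_pred :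
    (fun d => PySem.Chars.isalnum d == true) = PySem.Chars.isalnum := by
  funext d; cases PySem.Chars.isalnum d <;> rfl

theorem pvBeq_false_pred :
    (fun d => PySem.Chars.isalnum d == false) = (fun d => !PySem.Chars.isalnum d) := by
  funext d; cases PySem.Chars.isalnum d <;> rfl

-- main induction: A's built-and-stripped text equals B's joined runs
theorem pvMain : ∀ (n : Nat) (cs : List Char), cs.length ≤ n →
    PySem.Chars.stripChars (pvRender cs false) ['_'] = PySem.Chars.join ['_'] (pvRuns cs) := by
  intro n
  induction n with
  | zero =>
    intro cs hcs
    have : cs = [] := List.eq_nil_of_length_eq_zero (Nat.le_zero.mp hcs)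
    subst this
    simp [pvRender, pvRuns, PySem.Chars.join_nil, PySem.Chars.stripChars]
  | succ n ih =>
    intro cs hcs
    match cs with
    | [] => simp [pvRender, pvRuns, PySem.Chars.join_nil, PySem.Chars.stripChars]
    | c :: rest =>
      simp only [List.length_cons, Nat.succ_le_succ_iff] at hcs
      by_cases h : PySem.Chars.isalnum c = true
      · -- alnum head: run = c :: takeWhile, continue at dropWhile
        have hrunno : ∀ x ∈ c :: rest.takeWhile PySem.Chars.isalnum, pvP x = false := by
          intro x hx
          rcases List.mem_cons.mp hx with rfl | hx
          · exact pvP_alnum h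
          · exact pvP_alnum (List.mem_takeWhile_imp hx)
        have hrender : pvRender (c :: rest) false
            = (c :: rest.takeWhile PySem.Chars.isalnum)
              ++ pvRender (rest.dropWhile PySem.Chars.isalnum) false := by
          rw [show pvRender (c :: rest) false = c :: pvRender rest false by simp [pvRender, h],
            pvRender_take rest]
          simp
        have hruns : pvRuns (c :: rest)
            = (c :: rest.takeWhile PySem.Chars.isalnum)
              :: pvRuns (rest.dropWhile PySem.Chars.isalnum) := by
          simp only [pvRuns, h, if_pos]
          rw [pvBeq_true_pred]
        rw [hrender, hruns]
        cases hre : rest.dropWhile PySem.Chars.isalnum with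
        | nil =>
          rw [show pvRender ([] : List Char) false = [] from rfl, List.append_nil,
            pvStrip_no_us hrunno, pvRuns_nil, PySem.Chars.join_singleton]
        | cons d r2 =>
          have hd : PySem.Chars.isalnum d = false := pvHead_dropWhile hre
          have hlen2 : r2.length < rest.length := by
            have h4 := List.length_dropWhile_le PySem.Chars.isalnum rest
            rw [hre] at h4
            simp only [List.length_cons] at h4
            omega
          have hrender2 : pvRender (d :: r2) false
              = '_' :: pvRender (r2.dropWhile (fun x => !PySem.Chars.isalnum x)) false := by
            simp [pvRender, hd, pvRender_true]
          have hruns2 : pvRuns (d :: r2)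
              = pvRuns (r2.dropWhile (fun x => !PySem.Chars.isalnum x)) := by
            simp only [pvRuns, hd, pvBeq_false_pred]
            simp
          rw [hrender2, hruns2]
          cases hrte : r2.dropWhile (fun x => !PySem.Chars.isalnum x) with
          | nil =>
            rw [show pvRender ([] : List Char) false = [] from rfl, pvStrip_append_us,
              pvStrip_no_us hrunno, pvRuns_nil, PySem.Chars.join_singleton]
          | cons z zs =>
            have hz : PySem.Chars.isalnum z = true := by
              have := pvHead_dropWhile hrte
              simpa using this
            have hrender3 : pvRender (z :: zs) false = z :: pvRender zs false := by
              simp [pvRender, hz]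
            rw [pvStrip_mid (c :: rest.takeWhile PySem.Chars.isalnum) (pvRender (z :: zs) false)
              hrunno (by simp) ⟨z, pvRender zs false, hrender3, pvP_alnum hz⟩]
            have hrtlen : (z :: zs).length ≤ n := by
              have h5 := List.length_dropWhile_le (fun x => !PySem.Chars.isalnum x) r2
              rw [hrte] at h5
              simp only [List.length_cons] at h5 ⊢
              omega
            rw [ih (z :: zs) hrtlen]
            cases hpr : pvRuns (z :: zs) with
            | nil =>
              exfalso
              simp only [pvRuns, hz] at hpr
              simp at hpr
            | cons q qs =>
              rw [PySem.Chars.join_cons_cons]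
              simp
      · -- non-alnum head: a single '_' is emitted and then stripped away
        have hrender : pvRender (c :: rest) false
            = '_' :: pvRender (rest.dropWhile (fun x => !PySem.Chars.isalnum x)) false := by
          simp [pvRender, h, pvRender_true]
        have hruns : pvRuns (c :: rest)
            = pvRuns (rest.dropWhile (fun x => !PySem.Chars.isalnum x)) := by
          simp only [Bool.not_eq_true] at h
          simp only [pvRuns, h, pvBeq_false_pred]
          simp
        rw [hrender, hruns, pvStrip_cons]
        exact ih _ (le_trans (List.length_dropWhile_le _ _) hcs)

-- ===== VERDICT (by name: the statement is the Claim_ definition above) =====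
theorem safe_metric_key_py_spec : Claim_equal_safe_metric_key_py := by
  intro name _
  unfold Spec_safe_metric_key_py
  simp only [safe_metric_key_py, safe_metric_key_py_alt]
  rw [pvFold_eq, List.nil_append, pvMain _ _ le_rfl]
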